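-- pv_equiv track=rewrite | github.com/ucsdsysnet/Rosebud | fpga_src/accel/full_ids/rtl/snort/fast_rule_extractor.py | content_len
-- ===== SOURCE A (Python) =====
-- def content_len(content):
--   count = 0
--   byte_mode = 0
--   # if content.startswith("!"):
--   #   content = content[1:]
--   for c in content:
--     if (c=='|'):
--       if (byte_mode==0):
--         byte_mode = 1
--       else:
--         count += 1
--         byte_mode = 0
--     else:
--       if (byte_mode==0):
--         count += 1
--       else:
--         if (c==' '):
--           count += 1
--   return count
-- ===== SOURCE B (Python) =====
-- def content_len(content):
--   parts = content.split('|')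
--   n = len(parts)
--   total = 0
--   for i, seg in enumerate(parts):
--     if i % 2 == 0:
--       total += len(seg)
--     else:
--       total += seg.count(' ')
--       if i < n - 1:
--         total += 1
--   return total
-- ===== Notes on version B (the rewrite author's own statement) =====
-- stated objective: faster
-- what changed: Replaces A's per-character Python loop with a byte_mode toggle by splitting the content on the pipe separator once and aggregating the segments by index parity: even segments add their length, odd (byte-mode) segments add their space count plus 1 when the segment is closed (not last); the per-character work moves into C-level str.split/len/count.
import Mathlib
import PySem

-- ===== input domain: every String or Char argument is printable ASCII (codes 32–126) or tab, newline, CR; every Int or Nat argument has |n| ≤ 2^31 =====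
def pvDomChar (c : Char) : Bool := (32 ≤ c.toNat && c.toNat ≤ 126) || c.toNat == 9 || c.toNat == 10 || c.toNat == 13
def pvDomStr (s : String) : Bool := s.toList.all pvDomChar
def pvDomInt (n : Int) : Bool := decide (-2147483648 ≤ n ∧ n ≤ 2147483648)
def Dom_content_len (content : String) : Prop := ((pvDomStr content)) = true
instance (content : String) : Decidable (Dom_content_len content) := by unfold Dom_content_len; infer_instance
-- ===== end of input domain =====

-- B replaces A's per-character byte-mode toggle scan with a split('|') followed by a
-- single aggregation over the segments by index parity (objective: simpler decomposition).

-- ===== PORT A =====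
-- literal port of A: one pass over the characters with (count, byte_mode) state
def content_len (content : String) : Int :=
  (content.toList.foldl
    (fun (s : Int × Int) (c : Char) =>
      if c = '|' then
        if s.2 = 0 then (s.1, 1) else (s.1 + 1, 0)
      else
        if s.2 = 0 then (s.1 + 1, s.2)
        else if c = ' ' then (s.1 + 1, s.2) else (s.1, s.2))
    (0, 0)).1

-- ===== PORT B =====
-- port of Source B: split on '|' (Python str.split with a 1-char sep = List.splitOn on the
-- characters), then fold over the enumerated segments: even index adds the segment
-- length, odd index adds its space count plus 1 when the segment is not the last
def content_len_alt (content : String) : Int :=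
  let parts := content.toList.splitOn '|'
  let n := parts.length
  parts.zipIdx.foldl
    (fun (total : Int) (p : List Char × Nat) =>
      if p.2 % 2 = 0 then total + p.1.length
      else total + p.1.count ' ' + (if p.2 < n - 1 then 1 else 0))
    0

-- ===== PRECONDITION & SPEC =====
def Spec_content_len (content : String) (out : Int) : Prop := out = content_len_alt content
instance (content : String) (out : Int) : Decidable (Spec_content_len content out) := by unfold Spec_content_len; infer_instance

-- ===== CLAIM (what is proved, stated in full; the proofs are below) =====
def Claim_equal_content_len : Prop := ∀ (content : String), Dom_content_len content → Spec_content_len content (content_len content)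

-- ===== LEMMAS AND PROOFS =====

-- the common value: alternating sum over the segments; the flag says "byte mode",
-- a byte segment contributes its space count plus 1 unless it is the last segment
def hSum : Bool → List (List Char) → Int
  | _, [] => 0
  | false, s :: rest => (s.length : Int) + hSum true rest
  | true, s :: rest => (s.count ' ' : Int) + (if rest = [] then 0 else 1) + hSum false rest

-- A's character loop as an explicit recursion (proof vehicle)
def loopA : List Char → Int → Int → Int
  | [], count, _ => count
  | c :: cs, count, m =>
    if c = '|' then
      if m = 0 then loopA cs count 1 else loopA cs (count + 1) 0
    else
      if m = 0 then loopA cs (count + 1) m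
      else if c = ' ' then loopA cs (count + 1) m else loopA cs count m

theorem foldl_eq_loopA (cs : List Char) : ∀ (count m : Int),
    (cs.foldl
      (fun (s : Int × Int) (c : Char) =>
        if c = '|' then
          if s.2 = 0 then (s.1, 1) else (s.1 + 1, 0)
        else
          if s.2 = 0 then (s.1 + 1, s.2)
          else if c = ' ' then (s.1 + 1, s.2) else (s.1, s.2))
      (count, m)).1 = loopA cs count m := by
  induction cs with
  | nil => intro count m; simp [loopA]
  | cons c cs ih =>
    intro count m
    rw [List.foldl_cons, loopA]
    split_ifs <;> simp_all

theorem loopA_eq (cs : List Char) : ∀ (acc : Int),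
    loopA cs acc 0 = acc + hSum false (cs.splitOn '|')
    ∧ loopA cs acc 1 = acc + hSum true (cs.splitOn '|') := by
  induction cs with
  | nil => intro acc; simp [loopA, List.splitOn, hSum]
  | cons c cs ih =>
    intro acc
    have hne := List.splitOnP_ne_nil (fun x => x == '|') cs
    by_cases hc : c = '|'
    · subst hc
      constructor
      · rw [loopA]
        norm_num [(ih acc).2]
        simp [List.splitOn, List.splitOnP_cons, hSum]
      · rw [loopA]
        norm_num [(ih (acc + 1)).1]
        simp only [List.splitOn] at hne ⊢
        rw [List.splitOnP_cons]
        simp [hSum, hne]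
        ring
    · obtain ⟨s0, rest, hrec⟩ : ∃ s0 rest, cs.splitOn '|' = s0 :: rest := by
        cases h : cs.splitOn '|' with
        | nil => exact absurd h (List.splitOnP_ne_nil _ cs)
        | cons a l => exact ⟨a, l, rfl⟩
      have hsplit : (c :: cs).splitOn '|' = (c :: s0) :: rest := by
        simp [List.splitOn, List.splitOnP_cons, hc] at hrec ⊢
        simp [hrec]
      constructor
      · rw [loopA]
        simp only [if_neg hc]
        rw [(ih (acc + 1)).1, hrec, hsplit]
        simp [hSum]
        ring
      · rw [loopA]
        simp only [if_neg hc]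
        norm_num
        by_cases hsp : c = ' '
        · subst hsp
          rw [if_pos rfl, (ih (acc + 1)).2, hrec, hsplit]
          simp [hSum]
          ring
        · rw [if_neg hsp, (ih acc).2, hrec, hsplit]
          simp [hSum, hsp]

theorem loopB_eq (n : Nat) : ∀ (ps : List (List Char)) (i : Nat) (acc : Int),
    i + ps.length = n →
    ((ps.zipIdx i).foldl
      (fun (total : Int) (p : List Char × Nat) =>
        if p.2 % 2 = 0 then total + p.1.length
        else total + p.1.count ' ' + (if p.2 < n - 1 then 1 else 0))
      acc)
      = acc + (if i % 2 = 0 then hSum false ps else hSum true ps) := by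
  intro ps
  induction ps with
  | nil => intro i acc _; simp [hSum]
  | cons s rest ih =>
    intro i acc hn
    rw [List.zipIdx_cons, List.foldl_cons]
    rw [ih (i + 1) _ (by simp at hn; omega)]
    by_cases hi : i % 2 = 0
    · have h1 : ¬ (i + 1) % 2 = 0 := by omega
      simp [hi, h1, hSum]
      ring
    · have h1 : (i + 1) % 2 = 0 := by omega
      have hlast : (i < n - 1) ↔ rest ≠ [] := by
        cases rest <;> simp at hn ⊢ <;> omega
      simp only [if_neg hi, if_pos h1, hSum]
      by_cases hr : rest = []
      · have hnl : ¬ i < n - 1 := fun h => (hlast.mp h) hr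
        simp [hr, hnl, hSum]
      · simp [hr, hlast.mpr hr]
        ring

-- ===== VERDICT (by name: the statement is the Claim_ definition above) =====
theorem content_len_spec : Claim_equal_content_len := by
  intro content _
  unfold Spec_content_len
  have hA : content_len content = hSum false (content.toList.splitOn '|') := by
    show (content.toList.foldl _ ((0 : Int), (0 : Int))).1 = _
    rw [foldl_eq_loopA, (loopA_eq content.toList 0).1, zero_add]
  have hB : content_len_alt content = hSum false (content.toList.splitOn '|') := by
    show ((content.toList.splitOn '|').zipIdx.foldl _ (0 : Int)) = _
    rw [show (content.toList.splitOn '|').zipIdx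
          = (content.toList.splitOn '|').zipIdx 0 from rfl,
        loopB_eq (content.toList.splitOn '|').length _ 0 0 (by simp)]
    simp
  rw [hA, hB]
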